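-- pv_equiv track=rewrite | github.com/StiensGate928/Srtforge | srtforge/engine_whisper.py | get_balanced_split_index
-- ===== SOURCE A (Python) =====
-- from typing import Any, Dict, List, Optional, Sequence, Tuple
--
-- HARD_PUNCT: Tuple[str, ...] = (".", "!", "?", "…", ":", ";")
--
-- SOFT_PUNCT: Tuple[str, ...] = (",",)
--
-- def get_balanced_split_index(words: List[str], max_chars: int) -> int:
--     """Calculates the best index to split a list of words into two balanced lines."""
--     if len(words) < 2:
--         return len(words)
--     best_cut = -1
--     best_score = -float("inf")
--
--     for i in range(len(words) - 1):
--         l1 = " ".join(words[: i + 1])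
--         l2 = " ".join(words[i + 1 :])
--         len1, len2 = len(l1), len(l2)
--
--         score = 0.0
--         if len1 > max_chars:
--             score -= 5000
--         if len2 > max_chars:
--             score -= 5000
--         score -= abs(len1 - len2) * 5.0
--         if words[i].endswith(HARD_PUNCT):
--             score += 5
--         elif words[i].endswith(SOFT_PUNCT):
--             score += 3
--         if len2 >= len1:
--             score += 1
--
--         if score > best_score:
--             best_score, best_cut = score, i + 1
--
--     return len(words) // 2 if best_cut == -1 else best_cut
-- ===== SOURCE B (Python) =====
-- def get_balanced_split_index(words, max_chars):
--     """Prefix-sum reformulation: line lengths in O(1) per cut, no joins/slices."""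
--     n = len(words)
--     if n < 2:
--         return n
--     total = sum(len(w) for w in words) + (n - 1)  # len of " ".join(words)
--     pref = 0          # len of " ".join(words[:i+1]) maintained incrementally
--     best_score = None
--     best_cut = 0
--     for i, w in enumerate(words[:-1]):
--         pref += len(w) + (0 if i == 0 else 1)
--         len1 = pref
--         len2 = total - pref - 1
--         score = -5 * abs(len1 - len2)
--         if len1 > max_chars:
--             score -= 5000
--         if len2 > max_chars:
--             score -= 5000
--         if w:
--             last = w[-1]
--             if last in ".!?…:;":
--                 score += 5
--             elif last == ",":
--                 score += 3
--         if len1 <= len2: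
--             score += 1
--         if best_score is None or score > best_score:
--             best_score, best_cut = score, i + 1
--     return best_cut
-- ===== Notes on version B (the rewrite author's own statement) =====
-- stated objective: faster
-- what changed: B replaces A's per-candidate string joins and slices (O(n) characters per cut) with a single pass that maintains a running prefix length and a precomputed total, computing both line lengths in O(1) per cut and testing the punctuation bonus on the word's last character.
import Mathlib
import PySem

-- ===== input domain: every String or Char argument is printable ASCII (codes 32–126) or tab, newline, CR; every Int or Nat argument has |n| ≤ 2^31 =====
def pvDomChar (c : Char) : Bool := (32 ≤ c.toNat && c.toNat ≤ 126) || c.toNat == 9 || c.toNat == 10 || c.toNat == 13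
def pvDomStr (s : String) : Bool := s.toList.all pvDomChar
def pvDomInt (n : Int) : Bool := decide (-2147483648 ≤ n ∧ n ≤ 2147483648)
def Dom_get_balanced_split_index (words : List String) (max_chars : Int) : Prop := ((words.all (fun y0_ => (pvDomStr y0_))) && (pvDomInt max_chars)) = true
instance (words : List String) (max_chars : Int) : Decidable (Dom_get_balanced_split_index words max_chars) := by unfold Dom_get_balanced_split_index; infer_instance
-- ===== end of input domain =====

-- B replaces A's per-cut string joins/slices with one prefix-sum pass (line lengths in O(1) per
-- candidate cut); objective: faster (O(n) total characters vs O(n^2)).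
-- Python's score is a float whose every term is integer-valued, so the ports carry it as Int
-- exactly; the initial -inf is ported as 'none' (Option Int), '> -inf' as the 'none' branch.

-- ===== PORT A =====
def pvHardPunct : List String := [".", "!", "?", "…", ":", ";"]
def pvSoftPunct : List String := [","]

def get_balanced_split_index (words : List String) (max_chars : Int) : Int :=
  if words.length < 2 then (words.length : Int)
  else
    -- state = (best_cut, best_score); best_score none = -float("inf")
    let r := (PySem.List.pyRange 0 ((words.length : Int) - 1) 1).foldl
      (fun (st : Int × Option Int) (i : Int) =>
        let l1 := PySem.Str.join " " (PySem.List.slice words none (some (i + 1)))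
        let l2 := PySem.Str.join " " (PySem.List.slice words (some (i + 1)) none)
        let len1 := PySem.Str.len l1
        let len2 := PySem.Str.len l2
        let score : Int := 0
        let score := if len1 > max_chars then score - 5000 else score
        let score := if len2 > max_chars then score - 5000 else score
        let score := score - |len1 - len2| * 5
        let w := PySem.List.pyGetD words i ""
        let score := if pvHardPunct.any (fun p => PySem.Str.endswith w p) then score + 5
                     else if pvSoftPunct.any (fun p => PySem.Str.endswith w p) then score + 3
                     else score
        let score := if len2 ≥ len1 then score + 1 else score
        match st.2 with
        | none => (i + 1, some score)
        | some b => if score > b then (i + 1, some score) else st)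
      (-1, none)
    if r.1 = -1 then PySem.Int.floordiv (words.length : Int) 2 else r.1

-- ===== PORT B =====
def get_balanced_split_index_alt (words : List String) (max_chars : Int) : Int :=
  let n := words.length
  if n < 2 then (n : Int)
  else
    let total : Int := (words.map PySem.Str.len).sum + ((n : Int) - 1)
    -- state = (pref, best_score, best_cut)
    let r := (PySem.List.enumerate words.dropLast 0).foldl
      (fun (st : Int × Option Int × Int) (iw : Int × String) =>
        let pref := st.1 + PySem.Str.len iw.2 + (if iw.1 = 0 then 0 else 1)
        let len1 := pref
        let len2 := total - pref - 1
        let score : Int := -5 * |len1 - len2|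
        let score := if len1 > max_chars then score - 5000 else score
        let score := if len2 > max_chars then score - 5000 else score
        let score :=
          match PySem.Str.pyGet? iw.2 (-1) with
          | some c =>
            if c ∈ ['.', '!', '?', '…', ':', ';'] then score + 5
            else if c = ',' then score + 3
            else score
          | none => score
        let score := if len1 ≤ len2 then score + 1 else score
        match st.2.1 with
        | none => (pref, some score, iw.1 + 1)
        | some b => if score > b then (pref, some score, iw.1 + 1) else (pref, st.2.1, st.2.2))
      (0, none, 0)
    r.2.2

-- ===== PRECONDITION & SPEC =====
def Spec_get_balanced_split_index (words : List String) (max_chars : Int) (out : Int) : Prop := out = get_balanced_split_index_alt words max_chars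
instance (words : List String) (max_chars : Int) (out : Int) : Decidable (Spec_get_balanced_split_index words max_chars out) := by unfold Spec_get_balanced_split_index; infer_instance

-- ===== CLAIM (what is proved, stated in full; the proofs are below) =====
def Claim_equal_get_balanced_split_index : Prop := ∀ (words : List String) (max_chars : Int), Dom_get_balanced_split_index words max_chars → Spec_get_balanced_split_index words max_chars (get_balanced_split_index words max_chars)

-- ===== LEMMAS AND PROOFS =====

-- ---- generic "best cut" fold (the common shape of both loops' (best_cut, best_score) state) ----
def pvStep (f : Nat → Int) (st : Int × Option Int) (k : Nat) : Int × Option Int :=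
  match st.2 with
  | none => ((k : Int) + 1, some (f k))
  | some b => if f k > b then ((k : Int) + 1, some (f k)) else st

def pvBest (f : Nat → Int) (l : List Nat) (st : Int × Option Int) : Int × Option Int :=
  l.foldl (pvStep f) st

theorem pvBest_congr (f g : Nat → Int) (l : List Nat) (st : Int × Option Int)
    (h : ∀ k ∈ l, f k = g k) : pvBest f l st = pvBest g l st := by
  induction l generalizing st with
  | nil => rfl
  | cons k t ih =>
    have hk : f k = g k := h k (by simp)
    simp only [pvBest, List.foldl_cons]
    rw [show pvStep f st k = pvStep g st k by simp [pvStep, hk]]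
    exact ih _ (fun j hj => h j (by simp [hj]))

theorem pvBest_fst_nonneg (f : Nat → Int) (l : List Nat) (st : Int × Option Int)
    (h : 0 ≤ st.1) : 0 ≤ (pvBest f l st).1 := by
  induction l generalizing st with
  | nil => exact h
  | cons k t ih =>
    simp only [pvBest, List.foldl_cons]
    apply ih
    rcases st with ⟨c, b⟩
    cases b with
    | none => simp [pvStep]; omega
    | some b => simp only [pvStep]; split <;> simp <;> omega

theorem pvBest_none_ignores_cut (f : Nat → Int) (k : Nat) (t : List Nat) (c₁ c₂ : Int) :
    pvBest f (k :: t) (c₁, none) = pvBest f (k :: t) (c₂, none) := by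
  simp [pvBest, pvStep]

-- ---- join length ----
theorem pvLenJoinC (ps : List (List Char)) (h : ps ≠ []) :
    (PySem.Chars.join [' '] ps).length + 1 = (ps.map List.length).sum + ps.length := by
  induction ps with
  | nil => simp at h
  | cons p t ih =>
    cases t with
    | nil => simp [PySem.Chars.join_singleton]
    | cons q r =>
      rw [PySem.Chars.join_cons_cons]
      have := ih (by simp)
      simp only [List.length_append, List.map_cons, List.sum_cons, List.length_cons,
        List.length_nil] at *
      omega

theorem pvSumLen (ws : List String) :
    (ws.map PySem.Str.len).sum = (((ws.map (fun w => w.toList.length)).sum : Nat) : Int) := by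
  induction ws with
  | nil => simp
  | cons a t ih => simp only [List.map_cons, List.sum_cons, PySem.Str.len_eq, ih]; push_cast; ring

theorem pvLenJoin (ws : List String) (h : ws ≠ []) :
    PySem.Str.len (PySem.Str.join " " ws) =
      (ws.map PySem.Str.len).sum + (ws.length : Int) - 1 := by
  have h1 : (" ".toList) = [' '] := rfl
  have h2 := pvLenJoinC (ws.map String.toList) (by simpa using h)
  simp only [List.map_map, List.length_map] at h2
  rw [PySem.Str.len_eq, PySem.Str.toList_join, h1, pvSumLen]
  have h3 : ((PySem.Chars.join [' '] (ws.map String.toList)).length : Int) + 1 =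
      ((ws.map (List.length ∘ String.toList)).sum : Int) + (ws.length : Int) := by
    exact_mod_cast congrArg (Nat.cast : Nat → Int) h2
  have h4 : (ws.map (List.length ∘ String.toList)).sum = (ws.map (fun w => w.toList.length)).sum := by
    rfl
  rw [h4] at h3
  push_cast at h3 ⊢
  omega

-- ---- single-character endswith ----
theorem pvSuffixSingleton (l : List Char) (c : Char) : ([c] <:+ l) ↔ l.getLast? = some c := by
  constructor
  · rintro ⟨t, rfl⟩; simp
  · intro h
    rcases List.eq_nil_or_concat l with rfl | ⟨t, a, rfl⟩
    · simp at h
    · simp at h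
      exact ⟨t, by simp [h]⟩

theorem pvEndswithChar (w : String) (p : String) (c : Char) (hp : p.toList = [c]) :
    PySem.Str.endswith w p = (w.toList.getLast? == some c) := by
  rw [PySem.Str.endswith_eq, hp]
  rcases h : PySem.Chars.endswith w.toList [c] with _ | _
  · have hns : ¬ ([c] <:+ w.toList) := by
      intro hs
      rw [← PySem.Chars.endswith_iff] at hs
      rw [h] at hs; exact Bool.false_ne_true hs
    rw [pvSuffixSingleton] at hns
    symm; simpa using hns
  · have hs : [c] <:+ w.toList := by rw [← PySem.Chars.endswith_iff, h]
    rw [pvSuffixSingleton] at hs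
    simp [hs]

-- ---- the per-cut scores, written over (len1, len2 / pref, word) ----
def pvScoreARaw (max_chars len1 len2 : Int) (w : String) : Int :=
  let score : Int := 0
  let score := if len1 > max_chars then score - 5000 else score
  let score := if len2 > max_chars then score - 5000 else score
  let score := score - |len1 - len2| * 5
  let score := if pvHardPunct.any (fun p => PySem.Str.endswith w p) then score + 5
               else if pvSoftPunct.any (fun p => PySem.Str.endswith w p) then score + 3
               else score
  if len2 ≥ len1 then score + 1 else score

def pvScoreA (words : List String) (max_chars : Int) (i : Int) : Int :=
  pvScoreARaw max_chars
    (PySem.Str.len (PySem.Str.join " " (PySem.List.slice words none (some (i + 1)))))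
    (PySem.Str.len (PySem.Str.join " " (PySem.List.slice words (some (i + 1)) none)))
    (PySem.List.pyGetD words i "")

def pvScoreBRaw (max_chars total pref : Int) (w : String) : Int :=
  let len1 := pref
  let len2 := total - pref - 1
  let score : Int := -5 * |len1 - len2|
  let score := if len1 > max_chars then score - 5000 else score
  let score := if len2 > max_chars then score - 5000 else score
  let score :=
    match PySem.Str.pyGet? w (-1) with
    | some c =>
      if c ∈ ['.', '!', '?', '…', ':', ';'] then score + 5
      else if c = ',' then score + 3
      else score
    | none => score
  if len1 ≤ len2 then score + 1 else score

-- prefix length: pvP ds s = len(" ".join(ds[:s])) (0 for s = 0)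
def pvP (ds : List String) (s : Nat) : Int :=
  ((ds.take s).map PySem.Str.len).sum + (if s = 0 then 0 else (s : Int) - 1)

def pvScoreB (ds : List String) (total max_chars : Int) (k : Nat) : Int :=
  pvScoreBRaw max_chars total (pvP ds (k + 1)) (ds.getD k "")

theorem pvP_succ (ds : List String) (s : Nat) (h : s < ds.length) :
    pvP ds (s + 1) = pvP ds s + PySem.Str.len ds[s] + (if (s : Int) = 0 then 0 else 1) := by
  unfold pvP
  rw [List.take_add_one, List.getElem?_eq_getElem h]
  simp only [Option.toList_some, List.map_append, List.sum_append, List.map_cons, List.sum_cons]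
  rcases Nat.eq_zero_or_pos s with rfl | hs
  · simp
  · have hz : ¬ ((s : Int) = 0) := by omega
    rw [if_neg (by omega : ¬ s + 1 = 0), if_neg (by omega : ¬ s = 0), if_neg hz]
    simp only [List.map_nil, List.sum_nil]
    push_cast; ring

-- ---- the raw scores agree when total = len1 + len2 + 1 ----
theorem pvScoreRaw_eq (max_chars l1 l2 : Int) (w : String) :
    pvScoreARaw max_chars l1 l2 w = pvScoreBRaw max_chars (l1 + l2 + 1) l1 w := by
  simp only [pvScoreARaw, pvScoreBRaw]
  have htot : l1 + l2 + 1 - l1 - 1 = l2 := by ring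
  rw [htot]
  have hHard : pvHardPunct.any (fun p => PySem.Str.endswith w p) =
      ((w.toList.getLast? == some '.') || (w.toList.getLast? == some '!') ||
       (w.toList.getLast? == some '?') || (w.toList.getLast? == some '…') ||
       (w.toList.getLast? == some ':') || (w.toList.getLast? == some ';')) := by
    simp only [pvHardPunct, List.any_cons, List.any_nil, Bool.or_false]
    rw [pvEndswithChar w "." '.' rfl, pvEndswithChar w "!" '!' rfl,
        pvEndswithChar w "?" '?' rfl, pvEndswithChar w "…" '…' rfl,
        pvEndswithChar w ":" ':' rfl, pvEndswithChar w ";" ';' rfl]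
    simp [Bool.or_assoc]
  have hSoft : pvSoftPunct.any (fun p => PySem.Str.endswith w p) =
      (w.toList.getLast? == some ',') := by
    simp only [pvSoftPunct, List.any_cons, List.any_nil, Bool.or_false]
    rw [pvEndswithChar w "," ',' rfl]
  have hLast : PySem.Str.pyGet? w (-1) = w.toList.getLast? := by
    rw [PySem.Str.pyGet?_eq, PySem.Chars.pyGet?_eq_listPyGet?, PySem.List.pyGet?_neg_one]
  rw [hHard, hSoft, hLast]
  clear hHard hSoft hLast htot
  generalize |l1 - l2| = dd
  cases hg : w.toList.getLast? with
  | none =>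
    dsimp only
    simp [ge_iff_le]
    split_ifs <;> first | omega | linarith
  | some c =>
    dsimp only
    simp only [Bool.or_eq_true, beq_iff_eq, Option.some.injEq, List.mem_cons, List.not_mem_nil,
      or_false, ge_iff_le, or_assoc]
    split_ifs <;> first | omega | linarith

-- ---- the A-side loop is pvBest of pvScoreA ----
theorem pvA_loop (words : List String) (max_chars : Int) (h2 : 2 ≤ words.length) :
    (PySem.List.pyRange 0 ((words.length : Int) - 1) 1).foldl
      (fun (st : Int × Option Int) (i : Int) =>
        let l1 := PySem.Str.join " " (PySem.List.slice words none (some (i + 1)))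
        let l2 := PySem.Str.join " " (PySem.List.slice words (some (i + 1)) none)
        let len1 := PySem.Str.len l1
        let len2 := PySem.Str.len l2
        let score : Int := 0
        let score := if len1 > max_chars then score - 5000 else score
        let score := if len2 > max_chars then score - 5000 else score
        let score := score - |len1 - len2| * 5
        let w := PySem.List.pyGetD words i ""
        let score := if pvHardPunct.any (fun p => PySem.Str.endswith w p) then score + 5
                     else if pvSoftPunct.any (fun p => PySem.Str.endswith w p) then score + 3
                     else score
        let score := if len2 ≥ len1 then score + 1 else score
        match st.2 with
        | none => (i + 1, some score)
        | some b => if score > b then (i + 1, some score) else st)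
      (-1, none)
    = pvBest (fun k => pvScoreA words max_chars (k : Int)) (List.range (words.length - 1)) (-1, none) := by
  rw [PySem.List.pyRange_of_pos 0 ((words.length : Int) - 1) (by norm_num)]
  rw [if_pos (by omega : (0:Int) < (words.length : Int) - 1)]
  have hlen : (((words.length : Int) - 1 - 0 + 1 - 1) / 1).toNat = words.length - 1 := by omega
  rw [hlen, List.foldl_map]
  apply PySem.List.foldl_congr_mem
  intro st k _
  simp only [pvStep, pvScoreA, pvScoreARaw, zero_add, one_mul]

-- ---- the B-side loop is pvBest of pvScoreB ----
theorem pvB_loop (ds : List String) (total max_chars : Int) :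
    ∀ (l : List String) (s : Nat), ds.drop s = l → ∀ (cut : Int) (best : Option Int),
    ((PySem.List.enumerate l (s : Int)).foldl
      (fun (st : Int × Option Int × Int) (iw : Int × String) =>
        let pref := st.1 + PySem.Str.len iw.2 + (if iw.1 = 0 then 0 else 1)
        let len1 := pref
        let len2 := total - pref - 1
        let score : Int := -5 * |len1 - len2|
        let score := if len1 > max_chars then score - 5000 else score
        let score := if len2 > max_chars then score - 5000 else score
        let score :=
          match PySem.Str.pyGet? iw.2 (-1) with
          | some c =>
            if c ∈ ['.', '!', '?', '…', ':', ';'] then score + 5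
            else if c = ',' then score + 3
            else score
          | none => score
        let score := if len1 ≤ len2 then score + 1 else score
        match st.2.1 with
        | none => (pref, some score, iw.1 + 1)
        | some b => if score > b then (pref, some score, iw.1 + 1) else (pref, st.2.1, st.2.2))
      (pvP ds s, best, cut)).2
    = (let r := pvBest (pvScoreB ds total max_chars) (List.range' s l.length) (cut, best);
       (r.2, r.1)) := by
  intro l
  induction l with
  | nil => intro s h cut best; simp [PySem.List.enumerate_eq_zipIdx_map, pvBest]
  | cons w rest ih =>
    intro s h cut best
    have hs : s < ds.length := by
      by_contra hge
      rw [List.drop_eq_nil_of_le (by omega)] at h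
      exact (by simp at h)
    have hw : ds[s] = w := by
      have h0 : (ds.drop s)[0]'(by rw [h]; simp) = w := by simp [h]
      rw [List.getElem_drop] at h0
      simpa using h0
    have hrest : ds.drop (s + 1) = rest := by
      have ht := congrArg List.tail h
      rwa [List.tail_drop, List.tail_cons] at ht
    have hgd : ds.getD s "" = w := by
      rw [List.getD_eq_getElem?_getD, List.getElem?_eq_getElem hs, hw]; rfl
    have hcons : PySem.List.enumerate (w :: rest) (s : Int) =
          ((s : Int), w) :: PySem.List.enumerate rest ((s + 1 : Nat) : Int) := by
      simp [PySem.List.enumerate_eq_zipIdx_map, List.zipIdx_cons, List.zipIdx_succ, List.map_map]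
      intro a b _
      push_cast; ring
    rw [hcons, List.foldl_cons]
    simp only [List.length_cons, List.range'_succ]
    have hpref : pvP ds s + PySem.Str.len w + (if (s : Int) = 0 then 0 else 1) = pvP ds (s + 1) := by
      rw [pvP_succ ds s hs, hw]
    have hfs : pvScoreB ds total max_chars s =
        pvScoreBRaw max_chars total (pvP ds (s + 1)) w := by
      rw [pvScoreB, hgd]
    cases best with
    | none =>
      change (List.foldl _
        (pvP ds s + PySem.Str.len w + (if (s : Int) = 0 then 0 else 1),
         some (pvScoreBRaw max_chars total
           (pvP ds s + PySem.Str.len w + (if (s : Int) = 0 then 0 else 1)) w),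
         (s : Int) + 1) _).2 = _
      rw [hpref]
      refine (ih (s + 1) hrest _ (some _)).trans ?_
      simp only [pvBest, List.foldl_cons, pvStep, pvScoreB, hgd]
    | some b =>
      change (List.foldl _
        (if pvScoreBRaw max_chars total
              (pvP ds s + PySem.Str.len w + (if (s : Int) = 0 then 0 else 1)) w > b then
           (pvP ds s + PySem.Str.len w + (if (s : Int) = 0 then 0 else 1),
            some (pvScoreBRaw max_chars total
              (pvP ds s + PySem.Str.len w + (if (s : Int) = 0 then 0 else 1)) w),
            (s : Int) + 1)
         else
           (pvP ds s + PySem.Str.len w + (if (s : Int) = 0 then 0 else 1), some b, cut)) _).2 = _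
      rw [hpref]
      by_cases hgt : pvScoreBRaw max_chars total (pvP ds (s + 1)) w > b
      · rw [if_pos hgt]
        refine (ih (s + 1) hrest _ (some _)).trans ?_
        simp only [pvBest, List.foldl_cons, pvStep, pvScoreB, hgd]
        rw [if_pos hgt]
      · rw [if_neg hgt]
        refine (ih (s + 1) hrest _ (some b)).trans ?_
        simp only [pvBest, List.foldl_cons, pvStep, pvScoreB, hgd]
        rw [if_neg hgt]

-- ---- per-cut score equality ----
theorem pvScore_eq (words : List String) (max_chars : Int) (h2 : 2 ≤ words.length)
    (k : Nat) (hk : k < words.length - 1) :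
    pvScoreA words max_chars (k : Int) =
      pvScoreB words.dropLast ((words.map PySem.Str.len).sum + ((words.length : Int) - 1))
        max_chars k := by
  have hkn : k + 1 < words.length := by omega
  have hds : words.dropLast = words.take (words.length - 1) := by
    rw [List.dropLast_eq_take]
  have htake : words.dropLast.take (k + 1) = words.take (k + 1) := by
    rw [hds, List.take_take]
    congr 1
    omega
  -- the slices
  have hslice1 : PySem.List.slice words none (some ((k : Int) + 1)) = words.take (k + 1) := by
    rw [show ((k : Int) + 1) = ((k + 1 : Nat) : Int) by push_cast; ring,
        PySem.List.slice_to words (by positivity)]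
    simp
  have hslice2 : PySem.List.slice words (some ((k : Int) + 1)) none = words.drop (k + 1) := by
    rw [show ((k : Int) + 1) = ((k + 1 : Nat) : Int) by push_cast; ring,
        PySem.List.slice_from words (by positivity)]
    simp
  -- line lengths
  have hlen1 : PySem.Str.len (PySem.Str.join " " (PySem.List.slice words none (some ((k : Int) + 1))))
      = pvP words.dropLast (k + 1) := by
    rw [hslice1, pvLenJoin _ (by
      simp only [ne_eq, List.take_eq_nil_iff]
      push_neg
      constructor <;> [omega; (intro hnil; rw [hnil] at hkn; simp at hkn)])]
    rw [pvP, htake, if_neg (by omega : ¬ k + 1 = 0), List.length_take]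
    omega
  have hlen2 : PySem.Str.len (PySem.Str.join " " (PySem.List.slice words (some ((k : Int) + 1)) none))
      = ((words.map PySem.Str.len).sum + ((words.length : Int) - 1))
        - pvP words.dropLast (k + 1) - 1 := by
    rw [hslice2, pvLenJoin _ (by
      simp only [ne_eq, List.drop_eq_nil_iff]
      omega)]
    have hsplit : (words.map PySem.Str.len).sum =
        ((words.take (k + 1)).map PySem.Str.len).sum + ((words.drop (k + 1)).map PySem.Str.len).sum := by
      conv_lhs => rw [← List.take_append_drop (k + 1) words]
      rw [List.map_append, List.sum_append]
    rw [hsplit, pvP, htake, if_neg (by omega : ¬ k + 1 = 0), List.length_drop]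
    omega
  -- the word at the cut
  have hword : PySem.List.pyGetD words (k : Int) "" = words.dropLast.getD k "" := by
    have hkl : k < words.dropLast.length := by simp [List.length_dropLast]; omega
    rw [PySem.List.pyGetD_ofNat words k "" (by omega)]
    rw [List.getD_eq_getElem?_getD, List.getElem?_eq_getElem hkl, List.getElem_dropLast]
    rfl
  rw [pvScoreA, pvScoreB, hlen1, hlen2, hword]
  have := pvScoreRaw_eq max_chars (pvP words.dropLast (k + 1))
    (((words.map PySem.Str.len).sum + ((words.length : Int) - 1)) - pvP words.dropLast (k + 1) - 1)
    (words.dropLast.getD k "")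
  rw [this]
  congr 1
  ring

theorem get_balanced_split_index_spec : Claim_equal_get_balanced_split_index := by
  unfold Claim_equal_get_balanced_split_index
  intro words max_chars _
  unfold Spec_get_balanced_split_index
  by_cases hlen : words.length < 2
  · simp [get_balanced_split_index, get_balanced_split_index_alt, hlen]
  · have h2 : 2 ≤ words.length := by omega
    rw [get_balanced_split_index, get_balanced_split_index_alt]
    rw [if_neg hlen, if_neg hlen]
    rw [pvA_loop words max_chars h2]
    have hB := pvB_loop words.dropLast
      ((words.map PySem.Str.len).sum + ((words.length : Int) - 1)) max_chars
      words.dropLast 0 rfl 0 none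
    have hP0 : pvP words.dropLast 0 = 0 := by simp [pvP]
    rw [hP0] at hB
    rw [show ((0 : Nat) : Int) = (0 : Int) from rfl] at hB
    rw [show List.range' 0 words.dropLast.length = List.range words.dropLast.length from
      (List.range_eq_range').symm] at hB
    -- B's value is the .2.2 of the fold
    have hBval := congrArg Prod.snd hB
    dsimp only at hBval
    rw [hBval]
    -- now both sides are about pvBest; align the two
    have hdl : words.dropLast.length = words.length - 1 := by simp
    rw [hdl]
    set total := (words.map PySem.Str.len).sum + ((words.length : Int) - 1) with htot
    have hcongr : pvBest (fun k => pvScoreA words max_chars (k : Int)) (List.range (words.length - 1)) (-1, none)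
        = pvBest (pvScoreB words.dropLast total max_chars) (List.range (words.length - 1)) (-1, none) := by
      apply pvBest_congr
      intro k hk
      exact pvScore_eq words max_chars h2 k (List.mem_range.mp hk)
    rw [hcongr]
    obtain ⟨m, hm⟩ : ∃ m, words.length - 1 = m + 1 := ⟨words.length - 2, by omega⟩
    rw [hm, List.range_succ_eq_map]
    rw [pvBest_none_ignores_cut _ 0 _ (-1) 0]
    have hnn : 0 ≤ (pvBest (pvScoreB words.dropLast total max_chars)
        (0 :: List.map Nat.succ (List.range m)) (0, none)).1 := by
      show 0 ≤ (pvBest _ (List.map Nat.succ (List.range m)) ((0:Nat) + 1, some _)).1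
      apply pvBest_fst_nonneg
      simp
    rw [if_neg (by omega)]
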